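-- pv_equiv track=rewrite | github.com/nadahlberg/clx | projects/docket_data/run.py | get_crude_case_type
-- ===== SOURCE A (Python) =====
-- def get_crude_case_type(docket_number):
--     """Find common two letter identifiers as a crude proxy for case type."""
--     case_types = [
--         "cv",
--         "bk",
--         "cr",
--         "mj",
--         "po",
--         "mc",
--         "ap",
--         "sw",
--         "vv",
--         "dp",
--         "pq",
--         "gj",
--         "mb",
--     ]
--     parts = [x.lower() for x in docket_number.split("-")]
--     for case_type in case_types:
--         if case_type in parts:
--             return case_type
--     return "other"
-- ===== SOURCE B (Python) =====
-- def get_crude_case_type(docket_number):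
--     """Find common two letter identifiers as a crude proxy for case type."""
--     case_types = [
--         "cv",
--         "bk",
--         "cr",
--         "mj",
--         "po",
--         "mc",
--         "ap",
--         "sw",
--         "vv",
--         "dp",
--         "pq",
--         "gj",
--         "mb",
--     ]
--     rank = {ct: i for i, ct in enumerate(case_types)}
--     best = None
--     for part in docket_number.split("-"):
--         r = rank.get(part.lower())
--         if r is not None and (best is None or r < best):
--             best = r
--     return case_types[best] if best is not None else "other"
-- ===== Notes on version B (the rewrite author's own statement) =====
-- stated objective: alternative
-- what changed: B scans the docket's parts once, keeping the minimum priority rank looked up in a precomputed rank dict, instead of A's scan over the fixed case-type list testing membership in the parts list for each type.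
import Mathlib
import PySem

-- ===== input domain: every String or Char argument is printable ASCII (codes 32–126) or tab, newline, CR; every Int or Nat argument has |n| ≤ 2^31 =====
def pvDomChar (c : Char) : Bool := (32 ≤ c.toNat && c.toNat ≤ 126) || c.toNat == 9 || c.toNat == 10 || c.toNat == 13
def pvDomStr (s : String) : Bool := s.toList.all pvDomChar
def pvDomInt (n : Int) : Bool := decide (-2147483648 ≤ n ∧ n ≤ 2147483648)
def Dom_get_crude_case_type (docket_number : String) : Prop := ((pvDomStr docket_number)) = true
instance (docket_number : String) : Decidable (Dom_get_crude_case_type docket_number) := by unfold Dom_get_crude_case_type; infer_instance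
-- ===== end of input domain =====

-- B replaces A's scan over the fixed case-type list (membership test in parts for each
-- type) with a single pass over the docket's parts keeping the minimum priority rank
-- from a precomputed rank dict; same result, a different traversal (objective: alternative).

-- ===== PORT A =====
def pvCaseTypes : List String :=
  ["cv", "bk", "cr", "mj", "po", "mc", "ap", "sw", "vv", "dp", "pq", "gj", "mb"]

-- the 'for case_type in case_types: if case_type in parts: return case_type' loop
def pvLoopA : List String → List String → String
  | [], _ => "other"
  | ct :: rest, parts => if parts.contains ct then ct else pvLoopA rest parts

def get_crude_case_type (docket_number : String) : String :=
  let parts := ((PySem.Str.split? docket_number "-").getD []).map PySem.Str.lower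
  pvLoopA pvCaseTypes parts

-- ===== PORT B =====
-- (B uses the same literal case_types table; shared constant pvCaseTypes)
-- rank = {ct: i for i, ct in enumerate(case_types)}
def pvRankB : PySem.Dict String Int :=
  (PySem.List.enumerate pvCaseTypes 0).foldl (fun d p => d.insert p.2 p.1) PySem.Dict.empty

-- loop body: r = rank.get(part.lower()); if r is not None and (best is None or r < best): best = r
def pvStepB (best : Option Int) (part : String) : Option Int :=
  match pvRankB.get? (PySem.Str.lower part) with
  | none => best
  | some r =>
    match best with
    | none => some r
    | some b => if r < b then some r else some b

def get_crude_case_type_alt (docket_number : String) : String :=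
  let best := ((PySem.Str.split? docket_number "-").getD []).foldl pvStepB none
  match best with
  | none => "other"
  -- b is always a valid index of the 13-element list; getD only makes the lookup total
  | some b => (PySem.List.pyGet? pvCaseTypes b).getD "other"

-- ===== PRECONDITION & SPEC =====
def Spec_get_crude_case_type (docket_number : String) (out : String) : Prop := out = get_crude_case_type_alt docket_number
instance (docket_number : String) (out : String) : Decidable (Spec_get_crude_case_type docket_number out) := by unfold Spec_get_crude_case_type; infer_instance

-- ===== CLAIM (what is proved, stated in full; the proofs are below) =====
def Claim_equal_get_crude_case_type : Prop := ∀ (docket_number : String), Dom_get_crude_case_type docket_number → Spec_get_crude_case_type docket_number (get_crude_case_type docket_number)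

-- ===== LEMMAS AND PROOFS =====

-- index (in cts) of the first case type that occurs in ps (A's selection, as an index)
def pvIdxFirst (ps : List String) : List String → Option Nat
  | [] => none
  | ct :: rest => if ps.contains ct then some 0 else (pvIdxFirst ps rest).map (· + 1)

-- index of p in cts (first occurrence)
def pvIdxOf (p : String) : List String → Option Nat
  | [] => none
  | ct :: rest => if ct = p then some 0 else (pvIdxOf p rest).map (· + 1)

-- the merge pvStepB performs, abstracted (Int side / Nat side)
def pvOptMin (acc ro : Option Int) : Option Int :=
  match ro with
  | none => acc
  | some r => match acc with | none => some r | some b => if r < b then some r else some b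

def pvOptMinN (acc ro : Option Nat) : Option Nat :=
  match ro with
  | none => acc
  | some r => match acc with | none => some r | some b => if r < b then some r else some b

def pvMapC (o : Option Nat) : Option Int := o.map (fun n => (n : Int))

theorem pvStepB_eq (acc : Option Int) (part : String) :
    pvStepB acc part = pvOptMin acc (pvRankB.get? (PySem.Str.lower part)) := by
  unfold pvStepB pvOptMin
  cases pvRankB.get? (PySem.Str.lower part) <;> cases acc <;> rfl

theorem pvOptMin_none_left (o : Option Int) : pvOptMin none o = o := by
  cases o <;> rfl

theorem pvOptMin_none_right (o : Option Int) : pvOptMin o none = o := rfl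

theorem pvOptMin_some_some (x y : Int) : pvOptMin (some x) (some y) = some (min x y) := by
  simp only [pvOptMin]
  split_ifs <;> simp only [Option.some.injEq] <;> omega

theorem pvOptMin_assoc (a b c : Option Int) :
    pvOptMin (pvOptMin a b) c = pvOptMin a (pvOptMin b c) := by
  rcases a with _ | a <;> rcases b with _ | b <;> rcases c with _ | c <;>
    simp only [pvOptMin_none_left, pvOptMin_none_right, pvOptMin_some_some,
      Option.some.injEq] <;>
    first | rfl | exact min_assoc a b c

theorem pvFold_acc (ps : List String) (acc : Option Int) :
    ps.foldl pvStepB acc = pvOptMin acc (ps.foldl pvStepB none) := by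
  induction ps generalizing acc with
  | nil => rfl
  | cons p ps ih =>
    simp only [List.foldl_cons]
    rw [ih (pvStepB acc p), ih (pvStepB none p), pvStepB_eq, pvStepB_eq,
      pvOptMin_none_left, pvOptMin_assoc]

theorem pvIdxFirst_nil (cts : List String) : pvIdxFirst [] cts = none := by
  induction cts with
  | nil => rfl
  | cons ct rest ih => simp [pvIdxFirst, ih]

theorem pvOptMinN_zero_left (o : Option Nat) : pvOptMinN (some 0) o = some 0 := by
  rcases o with _ | r
  · rfl
  · simp [pvOptMinN]

theorem pvIdxFirst_cons (p : String) (ps cts : List String) :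
    pvIdxFirst (p :: ps) cts = pvOptMinN (pvIdxOf p cts) (pvIdxFirst ps cts) := by
  induction cts with
  | nil => rfl
  | cons ct rest ih =>
    simp only [pvIdxFirst, pvIdxOf, List.contains_cons]
    by_cases hcp : ct = p
    · subst hcp
      simp [pvOptMinN_zero_left]
    · have hne : (ct == p) = false := by simp [hcp]
      rw [hne]
      simp only [Bool.false_or, if_neg hcp]
      by_cases hmem : ps.contains ct
      · simp only [hmem, if_pos rfl]
        rcases h : pvIdxOf p rest with _ | k
        · rfl
        · simp [pvOptMinN]
      · simp only [hmem, ite_false, Bool.false_eq_true, if_false]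
        rw [ih]
        rcases pvIdxOf p rest with _ | a <;> rcases pvIdxFirst ps rest with _ | b <;>
          simp [pvOptMinN] <;> split_ifs <;> simp_all <;> omega

theorem pvMapC_optMin (a b : Option Nat) :
    pvMapC (pvOptMinN a b) = pvOptMin (pvMapC a) (pvMapC b) := by
  rcases a with _ | a <;> rcases b with _ | b <;>
    simp [pvOptMinN, pvOptMin, pvMapC] <;> split_ifs <;> simp

theorem pvRank_eq (p : String) :
    pvRankB.get? p = pvMapC (pvIdxOf p pvCaseTypes) := by
  by_cases h1 : p = "cv"
  · subst h1; rfl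
  by_cases h2 : p = "bk"
  · subst h2; rfl
  by_cases h3 : p = "cr"
  · subst h3; rfl
  by_cases h4 : p = "mj"
  · subst h4; rfl
  by_cases h5 : p = "po"
  · subst h5; rfl
  by_cases h6 : p = "mc"
  · subst h6; rfl
  by_cases h7 : p = "ap"
  · subst h7; rfl
  by_cases h8 : p = "sw"
  · subst h8; rfl
  by_cases h9 : p = "vv"
  · subst h9; rfl
  by_cases h10 : p = "dp"
  · subst h10; rfl
  by_cases h11 : p = "pq"
  · subst h11; rfl
  by_cases h12 : p = "gj"
  · subst h12; rfl
  by_cases h13 : p = "mb"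
  · subst h13; rfl
  · simp only [pvRankB, pvCaseTypes, PySem.List.enumerate_cons, PySem.List.enumerate_nil,
      List.foldl_cons, List.foldl_nil, pvIdxOf, pvMapC]
    rw [PySem.Dict.get?_insert, PySem.Dict.get?_insert, PySem.Dict.get?_insert,
      PySem.Dict.get?_insert, PySem.Dict.get?_insert, PySem.Dict.get?_insert,
      PySem.Dict.get?_insert, PySem.Dict.get?_insert, PySem.Dict.get?_insert,
      PySem.Dict.get?_insert, PySem.Dict.get?_insert, PySem.Dict.get?_insert,
      PySem.Dict.get?_insert]
    simp [h1, h2, h3, h4, h5, h6, h7, h8, h9, h10, h11, h12, h13,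
      Ne.symm h1, Ne.symm h2, Ne.symm h3, Ne.symm h4, Ne.symm h5, Ne.symm h6, Ne.symm h7,
      Ne.symm h8, Ne.symm h9, Ne.symm h10, Ne.symm h11, Ne.symm h12, Ne.symm h13,
      PySem.Dict.get?_empty]

theorem pvFold_eq (ps : List String) :
    ps.foldl pvStepB none = pvMapC (pvIdxFirst (ps.map PySem.Str.lower) pvCaseTypes) := by
  induction ps with
  | nil => simp [pvMapC, pvIdxFirst_nil]
  | cons p ps ih =>
    simp only [List.foldl_cons, List.map_cons]
    rw [pvFold_acc, ih, pvStepB_eq, pvOptMin_none_left, pvRank_eq,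
      pvIdxFirst_cons, pvMapC_optMin]

theorem pvLoopA_eq (cts ps : List String) :
    pvLoopA cts ps =
      match pvIdxFirst ps cts with
      | none => "other"
      | some n => cts.getD n "other" := by
  induction cts with
  | nil => rfl
  | cons ct rest ih =>
    simp only [pvLoopA, pvIdxFirst]
    by_cases h : ps.contains ct
    · have h' : ct ∈ ps := by simpa using h
      simp [h']
    · have hb : ps.contains ct = false := by simpa using h
      simp only [hb, Bool.false_eq_true, if_false]
      rw [ih]
      rcases pvIdxFirst ps rest with _ | n
      · rfl
      · simp [List.getD_eq_getElem?_getD]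

-- ===== VERDICT (by name: the statement is the Claim_ definition above) =====
theorem get_crude_case_type_spec : Claim_equal_get_crude_case_type := by
  intro d _
  unfold Spec_get_crude_case_type get_crude_case_type get_crude_case_type_alt
  rw [pvFold_eq, pvLoopA_eq]
  show (match pvIdxFirst _ pvCaseTypes with
        | none => "other" | some n => pvCaseTypes.getD n "other") = _
  rcases pvIdxFirst (((PySem.Str.split? d "-").getD []).map PySem.Str.lower) pvCaseTypes with _ | n
  · rfl
  · simp [pvMapC, PySem.List.pyGet?_natCast, List.getD_eq_getElem?_getD]
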